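-- pv_equiv track=rewrite | github.com/meeps44/scripts | stats/lib/util.py | get_index_where_lists_diverge
-- ===== SOURCE A (Python) =====
-- def get_max_len(list_of_lists: list) -> int:
--     """
--     Get the length of the longest list out of N lists.
--     """
--     max_len = 0
--     for item in list_of_lists:
--         max_len = max(len(item), max_len)
--     return max_len
--
-- def get_index_where_lists_diverge(list_of_lists: list) -> int:
--     """
--     In a set of n lists, get the first index where the lists diverge.
--     E.g.:
--     path1 = [1,2,3]
--     path2 = [1,5,3]
--     path3 = [1,2,4]
--     The lists first differ at index 1.
--     """
--     max_len = get_max_len(list_of_lists)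
--     try:
--         for idx in range(max_len):
--             tmp = list_of_lists[0][idx]
--             for li in list_of_lists[1:]:
--                 if tmp != li[idx]:
--                     return idx
--         return None
--     except IndexError:
--         return idx
-- ===== SOURCE B (Python) =====
-- def get_index_where_lists_diverge(list_of_lists: list) -> int:
--     """
--     In a set of n lists, get the first index where the lists diverge.
--     Length-driven: scan transposed columns up to the shortest length,
--     then report min_len if some list ended early, else None.
--     """
--     lens = [len(li) for li in list_of_lists]
--     min_len = min(lens, default=0)
--     max_len = max(lens, default=0)
--     for idx, col in enumerate(zip(*list_of_lists)):
--         if any(x != col[0] for x in col):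
--             return idx
--     return min_len if min_len < max_len else None
-- ===== Notes on version B (the rewrite author's own statement) =====
-- stated objective: simpler
-- what changed: Replaces A's try/except-IndexError loop over range(max_len) with a length-driven scan of transposed columns (zip) up to the minimum length, returning min_len explicitly when some list ends early.
import Mathlib
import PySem

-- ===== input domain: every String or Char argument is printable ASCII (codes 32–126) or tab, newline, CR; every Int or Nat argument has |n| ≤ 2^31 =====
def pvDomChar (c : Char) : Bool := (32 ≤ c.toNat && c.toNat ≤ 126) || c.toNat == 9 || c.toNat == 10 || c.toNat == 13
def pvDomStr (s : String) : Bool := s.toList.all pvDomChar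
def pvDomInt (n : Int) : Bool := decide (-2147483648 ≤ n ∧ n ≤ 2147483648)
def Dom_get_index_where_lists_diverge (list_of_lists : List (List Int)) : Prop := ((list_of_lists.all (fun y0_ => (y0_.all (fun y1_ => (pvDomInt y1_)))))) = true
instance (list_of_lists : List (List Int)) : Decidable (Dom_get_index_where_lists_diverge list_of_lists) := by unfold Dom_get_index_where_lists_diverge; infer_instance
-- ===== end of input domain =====

-- B replaces A's try/except-IndexError loop to max_len by a length-driven column
-- scan up to min_len (objective: simpler; same asymptotic cost).

-- ===== PORT A =====
def get_max_len (list_of_lists : List (List Int)) : Nat :=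
  list_of_lists.foldl (fun max_len item => max item.length max_len) 0

-- inner `for li in list_of_lists[1:]`: a difference returns idx; an IndexError on
-- li[idx] lands in the except clause, which also returns idx
def pvAInner (tmp : Int) (idx : Int) : List (List Int) → Option Int
  | [] => none
  | li :: rest =>
    match PySem.List.pyGet? li idx with
    | none => some idx
    | some v => if tmp ≠ v then some idx else pvAInner tmp idx rest

-- `for idx in range(max_len)`: fuel = remaining iterations; IndexError on
-- list_of_lists[0] or list_of_lists[0][idx] → except returns idx
def pvALoop (list_of_lists : List (List Int)) (idx : Int) : Nat → Option Int
  | 0 => none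
  | n + 1 =>
    match PySem.List.pyGet? list_of_lists 0 with
    | none => some idx
    | some first =>
      match PySem.List.pyGet? first idx with
      | none => some idx
      | some tmp =>
        match pvAInner tmp idx (PySem.List.slice list_of_lists (some 1) none) with
        | some r => some r
        | none => pvALoop list_of_lists (idx + 1) n

def get_index_where_lists_diverge (list_of_lists : List (List Int)) : Option Int :=
  pvALoop list_of_lists 0 (get_max_len list_of_lists)

-- ===== PORT B =====
-- `for idx, col in enumerate(zip(*list_of_lists))`: zip truncates at the shortest
-- list, so exactly min_len columns are visited; fuel = remaining columns
def pvBLoop (list_of_lists : List (List Int)) (idx : Nat) : Nat → Option Int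
  | 0 => none
  | n + 1 =>
    let col := list_of_lists.filterMap (fun li => PySem.List.pyGet? li (idx : Int))
    match col with
    | [] => pvBLoop list_of_lists (idx + 1) n
    | c :: rest =>
      if (c :: rest).any (fun x => x ≠ c) then some (idx : Int)
      else pvBLoop list_of_lists (idx + 1) n

def get_index_where_lists_diverge_alt (list_of_lists : List (List Int)) : Option Int :=
  let lens := list_of_lists.map List.length
  let min_len := lens.min?.getD 0
  let max_len := lens.max?.getD 0
  match pvBLoop list_of_lists 0 min_len with
  | some r => some r
  | none => if min_len < max_len then some (min_len : Int) else none

-- ===== PRECONDITION & SPEC =====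
def Spec_get_index_where_lists_diverge (list_of_lists : List (List Int)) (out : Option Int) : Prop := out = get_index_where_lists_diverge_alt list_of_lists
instance (list_of_lists : List (List Int)) (out : Option Int) : Decidable (Spec_get_index_where_lists_diverge list_of_lists out) := by unfold Spec_get_index_where_lists_diverge; infer_instance

-- ===== CLAIM (what is proved, stated in full; the proofs are below) =====
def Claim_equal_get_index_where_lists_diverge : Prop := ∀ (list_of_lists : List (List Int)), Dom_get_index_where_lists_diverge list_of_lists → Spec_get_index_where_lists_diverge list_of_lists (get_index_where_lists_diverge list_of_lists)

-- ===== LEMMAS AND PROOFS =====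

theorem pv_max_getD_cons (z : Nat) (l : List Nat) :
    ((z :: l).max?).getD 0 = max z (l.max?.getD 0) := by
  cases h : l.max? <;> simp [List.max?_cons, h]

theorem pv_get_max_len_eq (ll : List (List Int)) :
    get_max_len ll = ((ll.map List.length).max?.getD 0) := by
  have aux : ∀ (ll : List (List Int)) (a : Nat),
      List.foldl (fun m item => max item.length m) a ll
        = max a (((ll.map List.length).max?.getD 0)) := by
    intro ll
    induction ll with
    | nil => intro a; simp
    | cons x xs ih =>
      intro a
      simp only [List.foldl_cons, List.map_cons, pv_max_getD_cons]
      rw [ih (max x.length a)]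
      omega
  simpa using aux ll 0

theorem pv_min_getD_le (xs : List Nat) {a : Nat} (h : a ∈ xs) : xs.min?.getD 0 ≤ a :=
  List.min?_getD_le_of_mem h

theorem pv_le_max_getD (xs : List Nat) {a : Nat} (h : a ∈ xs) : a ≤ xs.max?.getD 0 :=
  List.le_max?_getD_of_mem h

theorem pv_min_getD_mem (xs : List Nat) (h : xs ≠ []) : xs.min?.getD 0 ∈ xs := by
  cases hm : xs.min? with
  | none => exact absurd (List.min?_eq_none_iff.mp hm) h
  | some m => simpa [hm] using (List.min?_eq_some_iff.mp hm).1

theorem pv_mn_le_mx (xs : List Nat) : xs.min?.getD 0 ≤ xs.max?.getD 0 := by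
  cases xs with
  | nil => simp
  | cons x l =>
    exact le_trans (pv_min_getD_le _ (List.mem_cons_self ..)) (pv_le_max_getD _ (List.mem_cons_self ..))

-- inner loop: some list too short → returns idx
theorem pvAInner_of_short (tmp : Int) (idx : Int) (tail : List (List Int))
    (h : ∃ li ∈ tail, PySem.List.pyGet? li idx = none) : pvAInner tmp idx tail = some idx := by
  induction tail with
  | nil => simp at h
  | cons li rest ih =>
    obtain ⟨w, hw, hnone⟩ := h
    simp only [pvAInner]
    cases hget : PySem.List.pyGet? li idx with
    | none => rfl
    | some v =>
      by_cases hv : tmp ≠ v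
      · simp [hv]
      · have hwr : w ∈ rest := by
          rcases List.mem_cons.mp hw with rfl | hwr
          · rw [hget] at hnone; exact absurd hnone (by simp)
          · exact hwr
        show (if tmp ≠ v then some idx else pvAInner tmp idx rest) = some idx
        rw [if_neg hv]
        exact ih ⟨w, hwr, hnone⟩

-- inner loop vs. the column test when every list is long enough
theorem pvAInner_all_some (tmp : Int) (idx : Int) (tail : List (List Int))
    (h : ∀ li ∈ tail, (PySem.List.pyGet? li idx).isSome = true) :
    pvAInner tmp idx tail
      = if (tail.filterMap (fun li => PySem.List.pyGet? li idx)).any (fun x => x ≠ tmp)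
        then some idx else none := by
  induction tail with
  | nil => simp [pvAInner]
  | cons li rest ih =>
    obtain ⟨v, hv⟩ := Option.isSome_iff_exists.mp (h li (List.mem_cons_self ..))
    have hrest := fun l hl => h l (List.mem_cons_of_mem _ hl)
    simp only [pvAInner, hv, List.filterMap_cons, List.any_cons]
    by_cases hne : tmp ≠ v
    · simp [hne, Ne.symm hne]
    · rw [not_ne_iff] at hne
      subst hne
      simp [ih hrest]

-- the main correspondence: A's loop at idx with fuel max-idx vs B's loop with fuel min-idx
theorem pv_key (ll : List (List Int)) :
    ∀ (n idx : Nat), idx + n = (ll.map List.length).min?.getD 0 →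
    pvALoop ll (idx : Int) (((ll.map List.length).max?.getD 0) - idx)
      = (match pvBLoop ll idx n with
         | some r => some r
         | none =>
           if (ll.map List.length).min?.getD 0 < (ll.map List.length).max?.getD 0
           then some (((ll.map List.length).min?.getD 0 : Nat) : Int) else none) := by
  intro n
  induction n with
  | zero =>
    intro idx hidx
    simp only [Nat.add_zero] at hidx
    subst hidx
    simp only [pvBLoop]
    by_cases hlt : (ll.map List.length).min?.getD 0 < (ll.map List.length).max?.getD 0
    · -- some list is strictly shorter than the longest: A raises at idx = min
      simp only [hlt, if_true]
      cases ll with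
      | nil => simp at hlt
      | cons l0 tail =>
        set mn := ((l0 :: tail).map List.length).min?.getD 0 with hmn
        have hfuel : ((l0 :: tail).map List.length).max?.getD 0 - mn
            = (((l0 :: tail).map List.length).max?.getD 0 - mn - 1) + 1 := by omega
        rw [hfuel]
        simp only [pvALoop, PySem.List.pyGet?_zero_cons]
        have hmem := pv_min_getD_mem ((l0 :: tail).map List.length) (by simp)
        rw [← hmn] at hmem
        simp only [List.mem_map] at hmem
        obtain ⟨lw, hlw, hlen⟩ := hmem
        by_cases h0 : l0.length ≤ mn
        · have hg : PySem.List.pyGet? l0 (mn : Int) = none := by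
            simp [List.getElem?_eq_none h0]
          simp [hg]
        · have hg : PySem.List.pyGet? l0 (mn : Int) = some (l0[mn]'(by omega)) := by
            simp [List.getElem?_eq_getElem (by omega : mn < l0.length)]
          -- the shortest list is in the tail; its lookup raises
          have hw_tail : lw ∈ tail := by
            rcases List.mem_cons.mp hlw with rfl | h
            · omega
            · exact h
          have hshort : pvAInner (l0[mn]'(by omega)) ((mn : Nat) : Int) tail = some (mn : Int) :=
            pvAInner_of_short _ _ tail ⟨lw, hw_tail, by
              simp [List.getElem?_eq_none (by omega : lw.length ≤ mn)]⟩
          simp [hg, hshort, PySem.List.slice_from_one]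
    · -- min = max: every list has the same length; the loop ends, return None
      have hle := pv_mn_le_mx (ll.map List.length)
      have heq : (ll.map List.length).min?.getD 0 = (ll.map List.length).max?.getD 0 := by omega
      simp [heq, pvALoop]
  | succ n ih =>
    intro idx hidx
    have hmn : idx < (ll.map List.length).min?.getD 0 := by omega
    cases ll with
    | nil => simp at hmn
    | cons l0 tail =>
      have hall : ∀ li ∈ (l0 :: tail), idx < li.length := by
        intro li hli
        have := pv_min_getD_le ((l0 :: tail).map List.length)
          (List.mem_map_of_mem (f := List.length) hli)
        omega
      have hmx : idx < ((l0 :: tail).map List.length).max?.getD 0 := by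
        have := pv_mn_le_mx ((l0 :: tail).map List.length); omega
      have hfuel : ((l0 :: tail).map List.length).max?.getD 0 - idx
          = ((((l0 :: tail).map List.length).max?.getD 0 - (idx + 1))) + 1 := by omega
      rw [hfuel]
      obtain ⟨t, htmp⟩ : ∃ t, PySem.List.pyGet? l0 (idx : Int) = some t :=
        ⟨l0[idx]'(hall l0 (by simp)), by simp [List.getElem?_eq_getElem (hall l0 (by simp))]⟩
      have hsome : ∀ li ∈ tail, (PySem.List.pyGet? li (idx : Int)).isSome = true := by
        intro li hli
        simp [List.getElem?_eq_getElem (hall li (List.mem_cons_of_mem _ hli))]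
      simp only [pvALoop, pvBLoop, PySem.List.pyGet?_zero_cons, htmp,
        PySem.List.slice_from_one, List.tail_cons,
        pvAInner_all_some _ _ _ hsome]
      have hcol : (l0 :: tail).filterMap (fun li => PySem.List.pyGet? li (idx : Int))
          = t :: tail.filterMap (fun li => PySem.List.pyGet? li (idx : Int)) := by
        simp only [List.filterMap_cons, htmp]
      have hb : ((t :: tail.filterMap (fun li => PySem.List.pyGet? li (idx : Int))).any
            (fun x => x ≠ t))
          = ((tail.filterMap (fun li => PySem.List.pyGet? li (idx : Int))).any
            (fun x => x ≠ t)) := by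
        simp
      cases hq : (tail.filterMap (fun li => PySem.List.pyGet? li (idx : Int))).any
          (fun x => decide (x ≠ t)) with
      | true =>
        simp only [hcol, hb, hq, if_true]
      | false =>
        simp only [hcol, hb, hq, Bool.false_eq_true, if_false]
        have hcast : ((idx : Int) + 1) = ((idx + 1 : Nat) : Int) := by push_cast; ring
        rw [hcast, ih (idx + 1) (by omega)]

-- ===== VERDICT (by name: the statement is the Claim_ definition above) =====
theorem get_index_where_lists_diverge_spec : Claim_equal_get_index_where_lists_diverge := by
  intro ll _
  show get_index_where_lists_diverge ll = get_index_where_lists_diverge_alt ll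
  unfold get_index_where_lists_diverge get_index_where_lists_diverge_alt
  rw [pv_get_max_len_eq]
  have h := pv_key ll ((ll.map List.length).min?.getD 0) 0 (by omega)
  simpa using h
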